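-- pv_equiv track=rewrite | github.com/VividSounder/Probation-Questionnaire | app.py | calculate_split_scores
-- ===== SOURCE A (Python) =====
-- segment_thresholds = {
--     1: {"threshold": 5, "program": "ICARE", "highest_score": 10},
--     2: {"threshold": 4, "program": "ICARE", "highest_score": 8},
--     3: {"threshold": 4, "program": "ICARE", "highest_score": 8},
--     4: {"threshold": 4, "program": "ICARE", "highest_score": 8},
--     5: {
--         "threshold": 4,
--         "program": "LEAP",
--         "highest_score": 8,
--         "education": {
--             "name": "EDUCATION",
--             "threshold": 4,
--             "questions": [0, 1, 2]  # indices of education questions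
--         },
--         "employment": {
--             "name": "EMPLOYMENT",
--             "threshold": 4,
--             "questions": [3, 4, 5]  # indices of employment questions
--         }
--     },
--     6: {"threshold": 4, "program": "LEAP", "highest_score": 8},
--     7: {"threshold": 4, "program": "ICARE", "highest_score": 8},
--     8: {"threshold": 4, "program": "Hulagpos", "highest_score": 8}
-- }
--
-- def calculate_split_scores(segment_answers, segment_id=5):
--     """Calculate separate scores for education and employment sections"""
--     education_score = 0
--     employment_score = 0
--
--     if segment_id in segment_answers:
--         edu_indices = segment_thresholds[segment_id]['education']['questions']
--         emp_indices = segment_thresholds[segment_id]['employment']['questions']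
--
--         for i, score in enumerate(segment_answers[segment_id]['scores']):
--             if i in edu_indices:
--                 education_score += score
--             elif i in emp_indices:
--                 employment_score += score
--
--     return education_score, employment_score
-- ===== SOURCE B (Python) =====
-- segment_thresholds = {
--     1: {"threshold": 5, "program": "ICARE", "highest_score": 10},
--     2: {"threshold": 4, "program": "ICARE", "highest_score": 8},
--     3: {"threshold": 4, "program": "ICARE", "highest_score": 8},
--     4: {"threshold": 4, "program": "ICARE", "highest_score": 8},
--     5: {
--         "threshold": 4,
--         "program": "LEAP",
--         "highest_score": 8,
--         "education": {"name": "EDUCATION", "threshold": 4, "questions": [0, 1, 2]},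
--         "employment": {"name": "EMPLOYMENT", "threshold": 4, "questions": [3, 4, 5]},
--     },
--     6: {"threshold": 4, "program": "LEAP", "highest_score": 8},
--     7: {"threshold": 4, "program": "ICARE", "highest_score": 8},
--     8: {"threshold": 4, "program": "Hulagpos", "highest_score": 8},
-- }
--
--
-- def calculate_split_scores(segment_answers, segment_id=5):
--     """Calculate separate scores for education and employment sections"""
--     if segment_id not in segment_answers:
--         return 0, 0
--     scores = segment_answers[segment_id]['scores']
--     cfg = segment_thresholds[segment_id]
--     education_score = sum(scores[i] for i in cfg['education']['questions'] if i < len(scores))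
--     employment_score = sum(scores[i] for i in cfg['employment']['questions'] if i < len(scores))
--     return education_score, employment_score
-- ===== Notes on version B (the rewrite author's own statement) =====
-- stated objective: simpler
-- what changed: B drops the enumerate-every-score-and-classify loop: it indexes directly into scores with the two small question-index lists and sums each group with a bounds-guarded generator expression.
import Mathlib
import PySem

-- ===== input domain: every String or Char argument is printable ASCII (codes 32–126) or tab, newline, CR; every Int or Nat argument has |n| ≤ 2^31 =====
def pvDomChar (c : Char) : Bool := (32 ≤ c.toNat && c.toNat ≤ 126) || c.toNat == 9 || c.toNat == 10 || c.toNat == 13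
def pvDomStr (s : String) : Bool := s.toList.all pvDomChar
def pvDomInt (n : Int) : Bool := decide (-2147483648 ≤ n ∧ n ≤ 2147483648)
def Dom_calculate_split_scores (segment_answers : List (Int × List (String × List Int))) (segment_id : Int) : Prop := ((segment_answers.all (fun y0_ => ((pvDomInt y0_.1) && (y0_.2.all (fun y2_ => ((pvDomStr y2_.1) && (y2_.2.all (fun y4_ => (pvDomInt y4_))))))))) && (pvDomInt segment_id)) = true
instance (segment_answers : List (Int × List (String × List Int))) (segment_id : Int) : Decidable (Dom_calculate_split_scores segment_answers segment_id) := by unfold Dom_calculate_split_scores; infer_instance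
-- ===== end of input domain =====

-- B replaces A's scan-every-score-and-classify loop by direct indexed sums over the
-- two question-index lists (objective: simpler).


-- ===== PORT A =====
-- segment_thresholds[sid]['education']['questions'] / ['employment']['questions']:
-- only key 5 carries 'education'/'employment'; any other present segment_id raises
-- KeyError in Python (excluded by Pre_), so the default branch value is irrelevant.
def pvEduIndices (sid : Int) : List Int := if sid = 5 then [0, 1, 2] else []
def pvEmpIndices (sid : Int) : List Int := if sid = 5 then [3, 4, 5] else []

def calculate_split_scores (segment_answers : List (Int × List (String × List Int))) (segment_id : Int) : Int × Int :=
  match segment_answers.lookup segment_id with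
  | none => (0, 0)
  | some seg =>
    let edu_indices := pvEduIndices segment_id
    let emp_indices := pvEmpIndices segment_id
    -- seg['scores']: KeyError when absent, excluded by Pre_
    let scores := (seg.lookup "scores").getD []
    (PySem.List.enumerate scores 0).foldl
      (fun (acc : Int × Int) p =>
        if p.1 ∈ edu_indices then (acc.1 + p.2, acc.2)
        else if p.1 ∈ emp_indices then (acc.1, acc.2 + p.2)
        else acc)
      (0, 0)

-- ===== PORT B =====
def calculate_split_scores_alt (segment_answers : List (Int × List (String × List Int))) (segment_id : Int) : Int × Int :=
  match segment_answers.lookup segment_id with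
  | none => (0, 0)
  | some seg =>
    let scores := (seg.lookup "scores").getD []
    let education_score := (pvEduIndices segment_id).foldl
      (fun (s : Int) i => if i < (scores.length : Int) then s + (PySem.List.pyGet? scores i).getD 0 else s) 0
    let employment_score := (pvEmpIndices segment_id).foldl
      (fun (s : Int) i => if i < (scores.length : Int) then s + (PySem.List.pyGet? scores i).getD 0 else s) 0
    (education_score, employment_score)

-- ===== PRECONDITION & SPEC =====
-- Pre_ excludes exactly the inputs where the Python A (and B alike) raises KeyError:
-- segment_id present but ≠ 5 (no 'education'/'employment' entry in segment_thresholds),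
-- or the inner dict lacking a 'scores' key.
def Pre_calculate_split_scores (segment_answers : List (Int × List (String × List Int))) (segment_id : Int) : Prop :=
  (segment_answers.lookup segment_id).all
    (fun seg => decide (segment_id = 5) && (seg.lookup "scores").isSome) = true
instance (segment_answers : List (Int × List (String × List Int))) (segment_id : Int) : Decidable (Pre_calculate_split_scores segment_answers segment_id) := by unfold Pre_calculate_split_scores; infer_instance

def pvWitness_calculate_split_scores : (List (Int × List (String × List Int))) × Int :=
  ([(5, [("scores", [2, 1, 0, 3, 4, 5, 9])])], 5)

def Spec_calculate_split_scores (segment_answers : List (Int × List (String × List Int))) (segment_id : Int) (out : Int × Int) : Prop := out = calculate_split_scores_alt segment_answers segment_id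
instance (segment_answers : List (Int × List (String × List Int))) (segment_id : Int) (out : Int × Int) : Decidable (Spec_calculate_split_scores segment_answers segment_id out) := by unfold Spec_calculate_split_scores; infer_instance

-- ===== CLAIM (what is proved, stated in full; the proofs are below) =====
def Claim_equal_calculate_split_scores : Prop := ∀ (segment_answers : List (Int × List (String × List Int))) (segment_id : Int), Dom_calculate_split_scores segment_answers segment_id → Pre_calculate_split_scores segment_answers segment_id → Spec_calculate_split_scores segment_answers segment_id (calculate_split_scores segment_answers segment_id)

-- ===== LEMMAS AND PROOFS =====

-- positions ≥ 6 belong to neither index group, so A's fold ignores them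
lemma pv_tail_irrelevant (rest : List Int) : ∀ (k : Int) (acc : Int × Int), 6 ≤ k →
    (PySem.List.enumerate rest k).foldl
      (fun (acc : Int × Int) p =>
        if p.1 ∈ pvEduIndices 5 then (acc.1 + p.2, acc.2)
        else if p.1 ∈ pvEmpIndices 5 then (acc.1, acc.2 + p.2)
        else acc) acc = acc := by
  induction rest with
  | nil => intro k acc _; simp [PySem.List.enumerate_nil]
  | cons x xs ih =>
    intro k acc hk
    rw [PySem.List.enumerate_cons, List.foldl_cons]
    have h1 : k ∉ pvEduIndices 5 := by simp [pvEduIndices]; omega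
    have h2 : k ∉ pvEmpIndices 5 := by simp [pvEmpIndices]; omega
    simp only [h1, h2, if_false]
    exact ih (k + 1) acc (by omega)

-- the core agreement for segment 5: A's enumerate-and-classify fold equals B's two indexed sums
lemma pv_core (scores : List Int) :
    (PySem.List.enumerate scores 0).foldl
      (fun (acc : Int × Int) p =>
        if p.1 ∈ pvEduIndices 5 then (acc.1 + p.2, acc.2)
        else if p.1 ∈ pvEmpIndices 5 then (acc.1, acc.2 + p.2)
        else acc) (0, 0)
    = ((pvEduIndices 5).foldl
        (fun (s : Int) i => if i < (scores.length : Int) then s + (PySem.List.pyGet? scores i).getD 0 else s) 0,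
       (pvEmpIndices 5).foldl
        (fun (s : Int) i => if i < (scores.length : Int) then s + (PySem.List.pyGet? scores i).getD 0 else s) 0) := by
  match scores with
  | [] => decide
  | [a] => simp [pvEduIndices, pvEmpIndices, PySem.List.enumerate_cons, PySem.List.enumerate_nil, PySem.List.pyGet?, PySem.List.pyIdx?]
  | [a, b] => simp [pvEduIndices, pvEmpIndices, PySem.List.enumerate_cons, PySem.List.enumerate_nil, PySem.List.pyGet?, PySem.List.pyIdx?]
  | [a, b, c] => simp [pvEduIndices, pvEmpIndices, PySem.List.enumerate_cons, PySem.List.enumerate_nil, PySem.List.pyGet?, PySem.List.pyIdx?]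
  | [a, b, c, d] => simp [pvEduIndices, pvEmpIndices, PySem.List.enumerate_cons, PySem.List.enumerate_nil, PySem.List.pyGet?, PySem.List.pyIdx?]
  | [a, b, c, d, e] => simp [pvEduIndices, pvEmpIndices, PySem.List.enumerate_cons, PySem.List.enumerate_nil, PySem.List.pyGet?, PySem.List.pyIdx?]
  | a :: b :: c :: d :: e :: f :: rest =>
    rw [show (a :: b :: c :: d :: e :: f :: rest) = ([a, b, c, d, e, f] ++ rest) by rfl,
        PySem.List.enumerate_append, List.foldl_append,
        show ((0 : Int) + (([a, b, c, d, e, f] : List Int).length : Int)) = 6 by norm_num,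
        pv_tail_irrelevant rest 6 _ (by norm_num)]
    simp [pvEduIndices, pvEmpIndices, PySem.List.enumerate_cons, PySem.List.enumerate_nil,
          PySem.List.pyGet?, PySem.List.pyIdx?]
    constructor <;> split_ifs <;> simp_all <;> omega

-- ===== VERDICT (by name: the statement is the Claim_ definition above) =====
theorem calculate_split_scores_spec : Claim_equal_calculate_split_scores := by
  intro sa sid _ hpre
  unfold Spec_calculate_split_scores calculate_split_scores calculate_split_scores_alt
  unfold Pre_calculate_split_scores at hpre
  cases h : sa.lookup sid with
  | none => rfl
  | some seg =>
    rw [h] at hpre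
    simp only [Option.all_some, Bool.and_eq_true, decide_eq_true_eq] at hpre
    obtain ⟨h5, _⟩ := hpre
    subst h5
    simp only
    exact pv_core _
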